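-- pv_equiv track=rewrite | github.com/MCarla23/Python2023 | Lab2/ex4.py | compose_song
-- ===== SOURCE A (Python) =====
-- def compose_song(lsn, lsm, start):
--     song = [lsn[start]]
--     nxt = start
--     lg = len(lsn)
--     for x in lsm:
--         nxt += x
--         nxt = nxt % len(lsn)
--         song.append(lsn[nxt])
--     return song
-- ===== SOURCE B (Python) =====
-- def compose_song(lsn, lsm, start):
--     # Divide and conquer: the song for a segment of moves, given the current
--     # modular position, is the song of its left half followed by the song of
--     # its right half started where the left half ended.
--     first = lsn[start]
--     lg = len(lsn)
--
--     def go(seg, s):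
--         # notes played for seg from position s, and the final position
--         if len(seg) == 1:
--             t = (s + seg[0]) % lg
--             return [lsn[t]], t
--         mid = len(seg) // 2
--         left, s1 = go(seg[:mid], s)
--         right, s2 = go(seg[mid:], s1)
--         return left + right, s2
--
--     if not lsm:
--         return [first]
--     notes, _ = go(lsm, start % lg)
--     return [first] + notes
-- ===== Notes on version B (the rewrite author's own statement) =====
-- stated objective: alternative
-- what changed: B replaces A's single left-to-right loop with a running modular index by a divide-and-conquer recursion: the notes for a segment of moves are the notes of its left half followed by the notes of its right half started at the position where the left half ended.
import Mathlib
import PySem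

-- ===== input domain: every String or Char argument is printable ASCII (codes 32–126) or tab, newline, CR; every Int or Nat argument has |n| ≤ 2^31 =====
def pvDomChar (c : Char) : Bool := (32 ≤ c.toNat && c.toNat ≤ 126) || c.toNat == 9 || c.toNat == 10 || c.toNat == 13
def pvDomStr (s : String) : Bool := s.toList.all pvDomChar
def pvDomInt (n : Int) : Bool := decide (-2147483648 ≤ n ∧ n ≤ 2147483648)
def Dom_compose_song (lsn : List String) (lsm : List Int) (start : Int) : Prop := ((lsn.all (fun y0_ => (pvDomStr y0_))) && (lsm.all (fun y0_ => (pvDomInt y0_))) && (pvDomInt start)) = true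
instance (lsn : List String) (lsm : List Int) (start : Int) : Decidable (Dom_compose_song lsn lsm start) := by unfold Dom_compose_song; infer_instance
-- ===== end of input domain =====

-- B replaces A's single accumulator loop with a divide-and-conquer recursion on the
-- move list (song of a segment = song of left half ++ song of right half).

-- ===== PORT A =====
-- single loop over lsm, state = (song so far, running modular index)
def compose_song (lsn : List String) (lsm : List Int) (start : Int) : List String :=
  match PySem.List.pyGet? lsn start with
  | none => []   -- IndexError in Python; outside Pre_
  | some first =>
    (lsm.foldl
      (fun (st : List String × Int) x =>
        let nxt := PySem.Int.mod (st.2 + x) (lsn.length : Int)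
        (st.1 ++ [PySem.List.pyGetD lsn nxt ""], nxt))
      ([first], start)).1

-- ===== PORT B =====
-- Source B's nested 'go': notes for a segment of moves from position s, plus the final
-- position; splits the segment in half and recurses on each half.  The fuel
-- parameter (always ≥ seg.length at every call site) only makes the recursion
-- structural; it never runs out on the port's own calls.
def pvGo (lsn : List String) (fuel : Nat) (seg : List Int) (s : Int) : List String × Int :=
  match fuel with
  | 0 => ([], s)
  | fuel + 1 =>
    if seg.length = 1 then
      let t := PySem.Int.mod (s + PySem.List.pyGetD seg 0 0) (lsn.length : Int)
      ([PySem.List.pyGetD lsn t ""], t)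
    else
      let mid := seg.length / 2
      let l := pvGo lsn fuel (PySem.List.slice seg none (some (mid : Int))) s
      let r := pvGo lsn fuel (PySem.List.slice seg (some (mid : Int)) none) l.2
      (l.1 ++ r.1, r.2)

def compose_song_alt (lsn : List String) (lsm : List Int) (start : Int) : List String :=
  match PySem.List.pyGet? lsn start with
  | none => []   -- IndexError in Python; outside Pre_
  | some first =>
    let lg : Int := lsn.length
    if lsm = [] then [first]
    else first :: (pvGo lsn lsm.length lsm (PySem.Int.mod start lg)).1

-- ===== PRECONDITION & SPEC =====
-- Pre_: start must be a valid (possibly negative) Python index into lsn; elsewhere A raises IndexError (and B too).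
def Pre_compose_song (lsn : List String) (lsm : List Int) (start : Int) : Prop :=
  PySem.Raise.InRange lsn.length start
instance (lsn : List String) (lsm : List Int) (start : Int) : Decidable (Pre_compose_song lsn lsm start) := by unfold Pre_compose_song; infer_instance

def pvWitness_compose_song : List String × List Int × Int := (["do", "re", "mi"], [2, -1, 5], 1)

def Spec_compose_song (lsn : List String) (lsm : List Int) (start : Int) (out : List String) : Prop := out = compose_song_alt lsn lsm start
instance (lsn : List String) (lsm : List Int) (start : Int) (out : List String) : Decidable (Spec_compose_song lsn lsm start out) := by unfold Spec_compose_song; infer_instance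

-- ===== CLAIM (what is proved, stated in full; the proofs are below) =====
def Claim_equal_compose_song : Prop := ∀ (lsn : List String) (lsm : List Int) (start : Int), Dom_compose_song lsn lsm start → Pre_compose_song lsn lsm start → Spec_compose_song lsn lsm start (compose_song lsn lsm start)

-- ===== LEMMAS AND PROOFS =====

-- A's loop step (with PySem.Int.mod already rewritten to % under 0 < len)
def pvStep (lsn : List String) (st : List String × Int) (x : Int) : List String × Int :=
  (st.1 ++ [PySem.List.pyGetD lsn ((st.2 + x) % (lsn.length : Int)) ""],
    (st.2 + x) % (lsn.length : Int))

-- the accumulator of A's fold is a prefix that just rides along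
theorem foldl_acc (lsn : List String) :
    ∀ (seg : List Int) (acc : List String) (s : Int),
      seg.foldl (pvStep lsn) (acc, s)
        = (acc ++ (seg.foldl (pvStep lsn) ([], s)).1, (seg.foldl (pvStep lsn) ([], s)).2) := by
  intro seg
  induction seg with
  | nil => intro acc s; simp
  | cons x xs ih =>
    intro acc s
    simp only [List.foldl_cons]
    rw [ih (pvStep lsn (acc, s) x).1 (pvStep lsn (acc, s) x).2,
      ih (pvStep lsn ([], s) x).1 (pvStep lsn ([], s) x).2]
    simp [pvStep]

-- divide and conquer equals the left-to-right fold
theorem pvGo_eq_foldl (lsn : List String) (hL : (0:Int) < lsn.length) :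
    ∀ (fuel : Nat) (seg : List Int) (s : Int), seg.length ≤ fuel → seg ≠ [] →
      pvGo lsn fuel seg s = seg.foldl (pvStep lsn) ([], s) := by
  intro fuel
  induction fuel with
  | zero =>
    intro seg s hf hne
    exact absurd (List.eq_nil_of_length_eq_zero (by omega)) hne
  | succ fuel ih =>
    intro seg s hf hne
    have hpos : 0 < seg.length := List.length_pos_of_ne_nil hne
    rw [pvGo]
    by_cases h1 : seg.length = 1
    · rw [if_pos h1]
      obtain ⟨x, hx⟩ : ∃ x, seg = [x] := List.length_eq_one_iff.mp h1
      subst hx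
      simp [pvStep, PySem.Int.mod_eq_emod_of_pos hL, PySem.List.pyGetD]
    · rw [if_neg h1]
      have h2 : 2 ≤ seg.length := by omega
      set mid := seg.length / 2 with hmid
      have hmid1 : 1 ≤ mid := by omega
      have hmidlt : mid < seg.length := by omega
      dsimp only
      rw [PySem.List.slice_to_natCast, PySem.List.slice_from_natCast]
      have hL1 : (seg.take mid).length = mid := by rw [List.length_take]; omega
      have hL2 : (seg.drop mid).length = seg.length - mid := by rw [List.length_drop]
      rw [ih (seg.take mid) s (by omega) (by
            intro h; rw [h] at hL1; simp at hL1; omega)]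
      rw [ih (seg.drop mid) _ (by omega) (by
            intro h; rw [h] at hL2; simp at hL2; omega)]
      conv_rhs => rw [← List.take_append_drop mid seg]
      rw [List.foldl_append]
      rw [foldl_acc lsn (seg.drop mid) ((seg.take mid).foldl (pvStep lsn) ([], s)).1
            ((seg.take mid).foldl (pvStep lsn) ([], s)).2]

-- the fold's output notes depend on the start position only through its residue
theorem foldl_mod_congr (lsn : List String) :
    ∀ (seg : List Int) (s s' : Int), seg ≠ [] →
      s % (lsn.length : Int) = s' % (lsn.length : Int) →
      seg.foldl (pvStep lsn) ([], s) = seg.foldl (pvStep lsn) ([], s') := by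
  intro seg s s' hne hcong
  cases seg with
  | nil => exact absurd rfl hne
  | cons x xs =>
    simp only [List.foldl_cons]
    have : pvStep lsn ([], s) x = pvStep lsn ([], s') x := by
      simp only [pvStep]
      rw [Int.add_emod s x, hcong, ← Int.add_emod]
    rw [this]

theorem compose_song_spec_aux (lsn : List String) (lsm : List Int) (start : Int)
    (hpre : Pre_compose_song lsn lsm start) :
    compose_song lsn lsm start = compose_song_alt lsn lsm start := by
  have hlen : 0 < lsn.length := by
    unfold Pre_compose_song PySem.Raise.InRange at hpre; omega
  have hL : (0:Int) < lsn.length := by exact_mod_cast hlen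
  have hsome : ∃ f, PySem.List.pyGet? lsn start = some f := by
    cases h : PySem.List.pyGet? lsn start with
    | none => exact absurd hpre (by simpa [h] using (PySem.List.pyGet?_eq_none_iff lsn start).mp h)
    | some f => exact ⟨f, rfl⟩
  obtain ⟨f, hf⟩ := hsome
  unfold compose_song compose_song_alt
  rw [hf]
  by_cases hm : lsm = []
  · subst hm; simp
  · simp only [if_neg hm, PySem.Int.mod_eq_emod_of_pos hL]
    have hA : (lsm.foldl
        (fun (st : List String × Int) x =>
          (st.1 ++ [PySem.List.pyGetD lsn ((st.2 + x) % (lsn.length : Int)) ""],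
            (st.2 + x) % (lsn.length : Int)))
        ([f], start)).1
        = f :: (lsm.foldl (pvStep lsn) ([], start)).1 := by
      rw [show (fun (st : List String × Int) x =>
          (st.1 ++ [PySem.List.pyGetD lsn ((st.2 + x) % (lsn.length : Int)) ""],
            (st.2 + x) % (lsn.length : Int))) = pvStep lsn from rfl]
      rw [foldl_acc lsn lsm [f] start]
      simp
    rw [hA]
    rw [pvGo_eq_foldl lsn hL lsm.length lsm _ le_rfl hm]
    rw [foldl_mod_congr lsn lsm (start % (lsn.length : Int)) start hm
      (Int.emod_emod_of_dvd start dvd_rfl)]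

-- ===== VERDICT (by name: the statement is the Claim_ definition above) =====
theorem compose_song_spec : Claim_equal_compose_song := by
  intro lsn lsm start _ hpre
  exact compose_song_spec_aux lsn lsm start hpre
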